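-- pv_equiv track=rewrite | github.com/TrackSante490/ts-server | scripts/verification/uptime_probe.py | count_downtime_events
-- ===== SOURCE A (Python) =====
-- def count_downtime_events(rows: list[dict]) -> int:
--     downtime_events = 0
--     was_down = False
--     for row in rows:
--         is_down = not row["ok"]
--         if is_down and not was_down:
--             downtime_events += 1
--         was_down = is_down
--     return downtime_events
-- ===== SOURCE B (Python) =====
-- from itertools import groupby
--
-- def count_downtime_events(rows: list[dict]) -> int:
--     return sum(1 for key, _group in groupby(rows, key=lambda r: not r["ok"]) if key)
-- ===== Notes on version B (the rewrite author's own statement) =====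
-- stated objective: idiomatic
-- what changed: Replaces the stateful was_down edge-detection loop with itertools.groupby collapsing consecutive equal statuses into runs and counting the down-runs.
import Mathlib
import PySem

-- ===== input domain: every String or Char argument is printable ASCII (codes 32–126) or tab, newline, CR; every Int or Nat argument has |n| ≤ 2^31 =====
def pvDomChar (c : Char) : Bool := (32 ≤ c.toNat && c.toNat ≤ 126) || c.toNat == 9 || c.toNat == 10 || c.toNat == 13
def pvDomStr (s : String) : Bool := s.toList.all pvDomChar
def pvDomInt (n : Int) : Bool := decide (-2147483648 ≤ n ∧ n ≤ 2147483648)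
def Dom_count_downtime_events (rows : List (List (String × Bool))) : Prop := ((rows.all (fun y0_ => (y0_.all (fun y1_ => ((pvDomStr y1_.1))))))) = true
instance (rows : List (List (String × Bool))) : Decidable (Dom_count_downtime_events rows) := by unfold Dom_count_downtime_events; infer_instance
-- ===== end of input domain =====

-- B replaces A's stateful was_down edge-detection loop by grouping consecutive equal
-- statuses into runs (itertools.groupby) and counting the down-runs; same O(n) cost.

-- ===== PORT A =====
-- loop with accumulator (downtime_events, was_down); row["ok"] = first-match lookup
def count_downtime_events (rows : List (List (String × Bool))) : Int :=
  (rows.foldl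
    (fun s row =>
      let is_down := !((row.lookup "ok").getD false)
      (if is_down && !s.2 then s.1 + 1 else s.1, is_down))
    ((0 : Int), false)).1

-- ===== PORT B =====
-- groupby(rows, key)'s group keys = consecutive-duplicate-collapsed key list
def pvCollapse : List Bool → List Bool
  | [] => []
  | [b] => [b]
  | a :: b :: t => if a == b then pvCollapse (b :: t) else a :: pvCollapse (b :: t)

def count_downtime_events_alt (rows : List (List (String × Bool))) : Int :=
  ((pvCollapse (rows.map (fun r => !((r.lookup "ok").getD false)))).countP (fun b => b) : Int)

-- ===== PRECONDITION & SPEC =====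
-- Pre_ excludes rows missing the key "ok", on which Python A raises KeyError.
def Pre_count_downtime_events (rows : List (List (String × Bool))) : Prop :=
  (rows.all (fun row => (row.lookup "ok").isSome)) = true
instance (rows : List (List (String × Bool))) : Decidable (Pre_count_downtime_events rows) := by
  unfold Pre_count_downtime_events; infer_instance
def pvWitness_count_downtime_events : (List (List (String × Bool))) :=
  [[("ok", false)], [("ok", true)], [("ok", false)]]

def Spec_count_downtime_events (rows : List (List (String × Bool))) (out : Int) : Prop := out = count_downtime_events_alt rows
instance (rows : List (List (String × Bool))) (out : Int) : Decidable (Spec_count_downtime_events rows out) := by unfold Spec_count_downtime_events; infer_instance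

-- ===== CLAIM (what is proved, stated in full; the proofs are below) =====
def Claim_equal_count_downtime_events : Prop := ∀ (rows : List (List (String × Bool))), Dom_count_downtime_events rows → Pre_count_downtime_events rows → Spec_count_downtime_events rows (count_downtime_events rows)

-- ===== LEMMAS AND PROOFS =====

-- edge-count fold vs. down-run count, with carried flag wd and accumulator c
theorem pv_fold_collapse (ks : List Bool) : ∀ (c : Int) (wd : Bool),
    (ks.foldl (fun s b => (if b && !s.2 then s.1 + 1 else s.1, b)) (c, wd)).1
      = c + ((pvCollapse ks).countP (fun b => b) : Int)
          - (if (ks.head?.getD false) && wd then 1 else 0) := by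
  induction ks with
  | nil => intro c wd; simp [pvCollapse]
  | cons a t ih =>
    intro c wd
    simp only [List.foldl_cons]
    rw [ih]
    cases t with
    | nil => cases a <;> cases wd <;> simp [pvCollapse]
    | cons b t' =>
      cases a <;> cases wd <;> cases b <;>
        simp [pvCollapse] <;> omega

-- ===== VERDICT (by name: the statement is the Claim_ definition above) =====
theorem count_downtime_events_spec : Claim_equal_count_downtime_events := by
  intro rows _ _
  unfold Spec_count_downtime_events count_downtime_events count_downtime_events_alt
  rw [show (rows.foldl
      (fun s row =>
        let is_down := !((row.lookup "ok").getD false)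
        (if is_down && !s.2 then s.1 + 1 else s.1, is_down))
      ((0 : Int), false))
    = ((rows.map (fun r => !((r.lookup "ok").getD false))).foldl
        (fun s b => (if b && !s.2 then s.1 + 1 else s.1, b)) ((0 : Int), false))
    by rw [List.foldl_map]]
  rw [pv_fold_collapse]
  simp
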